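-- pv_equiv track=rewrite | github.com/Mitronomik/cabdi-empirical | app/participant_api/services/randomization_service.py | _difficulty_targets
-- ===== SOURCE A (Python) =====
-- def _difficulty_targets(n: int) -> dict[str, int]:
--     ordered = ["low", "medium", "high"]
--     base = n // len(ordered)
--     remainder = n % len(ordered)
--     targets = {level: base for level in ordered}
--     for idx in range(remainder):
--         targets[ordered[idx]] += 1
--     return targets
-- ===== SOURCE B (Python) =====
-- def _difficulty_targets(n: int) -> dict[str, int]:
--     # level i gets ceil((n - i) / 3): no quotient/remainder split, one arithmetic
--     # expression per level (ceiling division realised as floor((n - i + 2) / 3)).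
--     return {level: (n - i + 2) // 3 for i, level in enumerate(["low", "medium", "high"])}
-- ===== Notes on version B (the rewrite author's own statement) =====
-- stated objective: simpler
-- what changed: Drops the quotient/remainder split entirely: level i's count is computed directly as the ceiling division ceil((n-i)/3), so there is no base value, no remainder and no distribution step.
import Mathlib
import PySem

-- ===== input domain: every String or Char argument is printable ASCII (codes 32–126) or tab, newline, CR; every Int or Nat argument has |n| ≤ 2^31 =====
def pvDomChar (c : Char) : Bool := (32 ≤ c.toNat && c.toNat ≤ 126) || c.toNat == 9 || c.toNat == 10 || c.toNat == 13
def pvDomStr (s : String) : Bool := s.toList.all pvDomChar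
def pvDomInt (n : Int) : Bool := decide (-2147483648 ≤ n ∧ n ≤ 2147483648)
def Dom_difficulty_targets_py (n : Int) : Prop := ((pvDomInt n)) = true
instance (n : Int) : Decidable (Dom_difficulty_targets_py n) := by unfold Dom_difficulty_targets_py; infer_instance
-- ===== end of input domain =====

-- B drops A's base/remainder split and pays each level i the ceiling division ceil((n-i)/3) directly (simpler).

-- ===== PORT A =====
-- targets[ordered[idx]] += 1: idx < remainder ≤ 2 < len(ordered) and every level is a key,
-- so pyGetD/modify-with-default are exact here (no IndexError/KeyError is reachable).
def difficulty_targets_py (n : Int) : List (String × Int) :=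
  let ordered : List String := ["low", "medium", "high"]
  let base := PySem.Int.floordiv n (ordered.length : Int)
  let remainder := PySem.Int.mod n (ordered.length : Int)
  let targets : PySem.Dict String Int :=
    ordered.foldl (fun d level => d.insert level base) PySem.Dict.empty
  let targets :=
    (PySem.List.pyRange 0 remainder 1).foldl
      (fun d idx => d.modify (PySem.List.pyGetD ordered idx "") 0 (· + 1)) targets
  targets.items

-- ===== PORT B =====
def difficulty_targets_py_alt (n : Int) : List (String × Int) :=
  (PySem.List.enumerate (["low", "medium", "high"] : List String)).map
    (fun p => (p.2, PySem.Int.floordiv (n - p.1 + 2) 3))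

-- ===== PRECONDITION & SPEC =====
def Spec_difficulty_targets_py (n : Int) (out : List (String × Int)) : Prop := out = difficulty_targets_py_alt n
instance (n : Int) (out : List (String × Int)) : Decidable (Spec_difficulty_targets_py n out) := by unfold Spec_difficulty_targets_py; infer_instance

-- ===== CLAIM (what is proved, stated in full; the proofs are below) =====
def Claim_equal_difficulty_targets_py : Prop := ∀ (n : Int), Dom_difficulty_targets_py n → Spec_difficulty_targets_py n (difficulty_targets_py n)

-- ===== LEMMAS AND PROOFS =====
theorem mod3_cases (n : Int) : n % 3 = 0 ∨ n % 3 = 1 ∨ n % 3 = 2 := by omega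

-- ===== VERDICT (by name: the statement is the Claim_ definition above) =====
theorem difficulty_targets_py_spec : Claim_equal_difficulty_targets_py := by
  intro n _
  unfold Spec_difficulty_targets_py difficulty_targets_py difficulty_targets_py_alt
  have hm : PySem.Int.mod n 3 = n % 3 := PySem.Int.mod_eq_emod_of_pos (by norm_num)
  have hd : PySem.Int.floordiv n 3 = n / 3 := PySem.Int.floordiv_eq_ediv_of_pos (by norm_num)
  have hd0 : PySem.Int.floordiv (n - 0 + 2) 3 = (n + 2) / 3 := by
    rw [PySem.Int.floordiv_eq_ediv_of_pos (by norm_num)]; ring_nf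
  have hd1 : PySem.Int.floordiv (n - 1 + 2) 3 = (n + 1) / 3 := by
    rw [PySem.Int.floordiv_eq_ediv_of_pos (by norm_num)]; ring_nf
  have hd2 : PySem.Int.floordiv (n - 2 + 2) 3 = n / 3 := by
    rw [PySem.Int.floordiv_eq_ediv_of_pos (by norm_num)]; ring_nf
  rcases mod3_cases n with h | h | h <;>
    simp [h, PySem.List.pyRange_one, PySem.List.enumerate,
      PySem.Dict.empty, PySem.Dict.insert, PySem.Dict.modify,
      PySem.List.pyGetD, PySem.List.pyIdx?, PySem.List.pyGet?,
      PySem.Dict.getD, PySem.Dict.get?, List.range_succ] <;>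
    omega
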